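-- pv_equiv track=rewrite | github.com/ThakurNishant2004/Decapsule_backend_and_ml | Backend/engines/debugger.py | debug_code_static
-- ===== SOURCE A (Python) =====
-- def analyze_code_for_issues(code: str):
--     """
--     OLD FUNCTION — your original static analysis logic.
--     Returns JUST a list.
--     """
--     issues = []
--
--     if "return" in code and "if" not in code and "for" not in code:
--         issues.append("Suspicious return statement without flow control.")
--
--     if "arr[" in code and "len(" not in code:
--         issues.append("Possible array index out of range.")
--
--     if "while" in code and "break" not in code:
--         issues.append("Possible infinite loop: while loop without break.")
--
--     if "fact(" in code and "n == 0" not in code: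
--         issues.append("Recursion missing base case (n == 0).")
--
--     return issues
--
-- def debug_code_static(code: str):
--     """
--     NEW WRAPPER — ensures /process gets clean JSON.
--     Converts simple strings into structured issue objects.
--     """
--     raw = analyze_code_for_issues(code)
--
--     structured = []
--
--     for issue in raw:
--         if "infinite loop" in issue:
--             structured.append({
--                 "type": "infinite_loop",
--                 "detail": issue,
--                 "severity": "high"
--             })
--         elif "array index" in issue:
--             structured.append({
--                 "type": "index_error",
--                 "detail": issue,
--                 "severity": "medium"
--             })
--         elif "base case" in issue:
--             structured.append({
--                 "type": "missing_base_case",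
--                 "detail": issue,
--                 "severity": "critical"
--             })
--         else:
--             structured.append({
--                 "type": "general_warning",
--                 "detail": issue,
--                 "severity": "low"
--             })
--
--     return {
--         "issues": structured
--     }
-- ===== SOURCE B (Python) =====
-- # Single table-driven pass: one rule list (predicate, type, detail, severity)
-- # built directly into structured issue dicts; no intermediate message list,
-- # no substring re-classification pass.
--
-- RULES = [
--     (lambda c: "return" in c and "if" not in c and "for" not in c,
--      "general_warning", "Suspicious return statement without flow control.", "low"),
--     (lambda c: "arr[" in c and "len(" not in c,
--      "index_error", "Possible array index out of range.", "medium"),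
--     (lambda c: "while" in c and "break" not in c,
--      "infinite_loop", "Possible infinite loop: while loop without break.", "high"),
--     (lambda c: "fact(" in c and "n == 0" not in c,
--      "missing_base_case", "Recursion missing base case (n == 0).", "critical"),
-- ]
--
-- def debug_code_static(code: str):
--     return {"issues": [{"type": t, "detail": d, "severity": s}
--                        for pred, t, d, s in RULES if pred(code)]}
-- ===== Notes on version B (the rewrite author's own statement) =====
-- stated objective: simpler
-- what changed: Replaced A's two shaped passes (build message strings, then reclassify each by substring) with a single declarative rule table (predicate, type, detail, severity) filtered once into the structured output.
import Mathlib
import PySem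

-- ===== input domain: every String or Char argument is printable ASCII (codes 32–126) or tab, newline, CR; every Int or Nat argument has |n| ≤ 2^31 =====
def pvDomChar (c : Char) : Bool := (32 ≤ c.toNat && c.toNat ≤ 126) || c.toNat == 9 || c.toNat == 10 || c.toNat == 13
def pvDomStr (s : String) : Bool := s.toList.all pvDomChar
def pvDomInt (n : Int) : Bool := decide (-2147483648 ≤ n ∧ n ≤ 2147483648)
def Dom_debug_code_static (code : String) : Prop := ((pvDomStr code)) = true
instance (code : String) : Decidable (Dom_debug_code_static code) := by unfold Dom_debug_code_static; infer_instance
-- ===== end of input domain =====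

-- ===== PORT A =====
-- B replaces A's two shaped passes with one table-driven pass (simpler decomposition; same cost).
-- helper: A's analyze_code_for_issues, message strings built conditionally in order
def analyze_code_for_issues (code : String) : List String :=
  let issues : List String := []
  let issues := if PySem.Str.isIn "return" code && !PySem.Str.isIn "if" code && !PySem.Str.isIn "for" code
    then issues ++ ["Suspicious return statement without flow control."] else issues
  let issues := if PySem.Str.isIn "arr[" code && !PySem.Str.isIn "len(" code
    then issues ++ ["Possible array index out of range."] else issues
  let issues := if PySem.Str.isIn "while" code && !PySem.Str.isIn "break" code
    then issues ++ ["Possible infinite loop: while loop without break."] else issues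
  let issues := if PySem.Str.isIn "fact(" code && !PySem.Str.isIn "n == 0" code
    then issues ++ ["Recursion missing base case (n == 0)."] else issues
  issues

def debug_code_static (code : String) : List (String × List (List (String × String))) :=
  let raw := analyze_code_for_issues code
  let structured := raw.foldl (fun acc issue =>
    if PySem.Str.isIn "infinite loop" issue then
      acc ++ [[("type", "infinite_loop"), ("detail", issue), ("severity", "high")]]
    else if PySem.Str.isIn "array index" issue then
      acc ++ [[("type", "index_error"), ("detail", issue), ("severity", "medium")]]
    else if PySem.Str.isIn "base case" issue then
      acc ++ [[("type", "missing_base_case"), ("detail", issue), ("severity", "critical")]]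
    else
      acc ++ [[("type", "general_warning"), ("detail", issue), ("severity", "low")]]) []
  [("issues", structured)]

-- ===== PORT B =====
-- B's rule table: (predicate over code, type, detail, severity)
def pvRules : List ((String → Bool) × String × String × String) :=
  [ (fun c => PySem.Str.isIn "return" c && !PySem.Str.isIn "if" c && !PySem.Str.isIn "for" c,
     "general_warning", "Suspicious return statement without flow control.", "low"),
    (fun c => PySem.Str.isIn "arr[" c && !PySem.Str.isIn "len(" c,
     "index_error", "Possible array index out of range.", "medium"),
    (fun c => PySem.Str.isIn "while" c && !PySem.Str.isIn "break" c,
     "infinite_loop", "Possible infinite loop: while loop without break.", "high"),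
    (fun c => PySem.Str.isIn "fact(" c && !PySem.Str.isIn "n == 0" c,
     "missing_base_case", "Recursion missing base case (n == 0).", "critical") ]

def debug_code_static_alt (code : String) : List (String × List (List (String × String))) :=
  [("issues",
    (pvRules.filter (fun r => r.1 code)).map
      (fun r => [("type", r.2.1), ("detail", r.2.2.1), ("severity", r.2.2.2)]))]

-- ===== PRECONDITION & SPEC =====
def Spec_debug_code_static (code : String) (out : List (String × List (List (String × String)))) : Prop := out = debug_code_static_alt code
instance (code : String) (out : List (String × List (List (String × String)))) : Decidable (Spec_debug_code_static code out) := by unfold Spec_debug_code_static; infer_instance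

-- ===== CLAIM (what is proved, stated in full; the proofs are below) =====
def Claim_equal_debug_code_static : Prop := ∀ (code : String), Dom_debug_code_static code → Spec_debug_code_static code (debug_code_static code)

-- ===== LEMMAS AND PROOFS =====

-- ===== VERDICT (by name: the statement is the Claim_ definition above) =====
theorem debug_code_static_spec : Claim_equal_debug_code_static := by
  intro code _
  unfold Spec_debug_code_static debug_code_static debug_code_static_alt analyze_code_for_issues pvRules
  rcases h1 : PySem.Str.isIn "return" code <;>
  rcases h2 : PySem.Str.isIn "if" code <;>
  rcases h3 : PySem.Str.isIn "for" code <;>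
  rcases h4 : PySem.Str.isIn "arr[" code <;>
  rcases h5 : PySem.Str.isIn "len(" code <;>
  rcases h6 : PySem.Str.isIn "while" code <;>
  rcases h7 : PySem.Str.isIn "break" code <;>
  rcases h8 : PySem.Str.isIn "fact(" code <;>
  rcases h9 : PySem.Str.isIn "n == 0" code <;>
  simp only [List.filter, h1, h2, h3, h4, h5, h6, h7, h8, h9] <;> decide
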